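-- pv_equiv track=rewrite | github.com/MaxymHuang/GRR_tool | app/main.py | to_list_from_tokens
-- ===== SOURCE A (Python) =====
-- from typing import List
--
-- def to_list_from_tokens(tokens: List[str]) -> List[str]:
--     out: List[str] = []
--     for tok in tokens:
--         for t in str(tok).split(','):
--             t2 = t.strip()
--             if t2:
--                 out.append(t2)
--     return out
-- ===== SOURCE B (Python) =====
-- from typing import List
--
-- def _flush(buf: List[str], out: List[str]) -> None:
--     # trim whitespace from both ends of the buffered field, emit if non-empty
--     while buf and buf[0].isspace():
--         buf.pop(0)
--     while buf and buf[-1].isspace():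
--         buf.pop()
--     if buf:
--         out.append(''.join(buf))
--
-- def to_list_from_tokens(tokens: List[str]) -> List[str]:
--     out: List[str] = []
--     for tok in tokens:
--         buf: List[str] = []
--         for ch in str(tok):
--             if ch == ',':
--                 _flush(buf, out)
--                 buf = []
--             else:
--                 buf.append(ch)
--         _flush(buf, out)
--     return out
-- ===== Notes on version B (the rewrite author's own statement) =====
-- stated objective: alternative
-- what changed: B replaces A's library split/strip per token by a manual character-level tokenizer: one scan per token accumulating a field buffer, flushed at each comma and at token end, with whitespace trimmed by pop-loops in the flush.
import Mathlib
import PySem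

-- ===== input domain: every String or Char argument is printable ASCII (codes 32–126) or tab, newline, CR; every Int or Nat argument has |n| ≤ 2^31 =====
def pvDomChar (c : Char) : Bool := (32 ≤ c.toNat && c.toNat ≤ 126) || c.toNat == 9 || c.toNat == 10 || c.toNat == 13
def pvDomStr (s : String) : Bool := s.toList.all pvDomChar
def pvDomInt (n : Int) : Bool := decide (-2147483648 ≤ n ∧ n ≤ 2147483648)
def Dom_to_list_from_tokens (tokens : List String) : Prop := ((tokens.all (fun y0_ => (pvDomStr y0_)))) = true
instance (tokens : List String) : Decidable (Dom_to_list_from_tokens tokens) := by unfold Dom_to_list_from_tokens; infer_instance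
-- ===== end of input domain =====

-- B replaces A's per-token split/strip by a manual character-level tokenizer (buffer + flush
-- on comma / token end, whitespace trimmed by pop-loops); objective: alternative algorithm.

-- ===== PORT A =====
def to_list_from_tokens (tokens : List String) : List String :=
  tokens.foldl (fun out tok =>
    ((PySem.Str.split? tok ",").getD []).foldl (fun out t =>
      let t2 := PySem.Str.strip t
      if t2 ≠ "" then out ++ [t2] else out) out) []

-- ===== PORT B =====
-- _flush: 'while buf and buf[0].isspace(): buf.pop(0)' = dropWhile at the front,
-- 'while buf and buf[-1].isspace(): buf.pop()' = dropWhile on the reverse; emit if non-empty.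
def pvFlush (buf : List Char) (out : List String) : List String :=
  let b1 := buf.dropWhile PySem.Chars.isspace
  let b2 := (b1.reverse.dropWhile PySem.Chars.isspace).reverse
  if b2 ≠ [] then out ++ [String.ofList b2] else out

def to_list_from_tokens_alt (tokens : List String) : List String :=
  tokens.foldl (fun out tok =>
    let st := tok.toList.foldl (fun (s : List Char × List String) ch =>
      if ch = ',' then ([], pvFlush s.1 s.2) else (s.1 ++ [ch], s.2)) ([], out)
    pvFlush st.1 st.2) []

-- ===== PRECONDITION & SPEC =====
def Spec_to_list_from_tokens (tokens : List String) (out : List String) : Prop := out = to_list_from_tokens_alt tokens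
instance (tokens : List String) (out : List String) : Decidable (Spec_to_list_from_tokens tokens out) := by unfold Spec_to_list_from_tokens; infer_instance

-- ===== CLAIM (what is proved, stated in full; the proofs are below) =====
def Claim_equal_to_list_from_tokens : Prop := ∀ (tokens : List String), Dom_to_list_from_tokens tokens → Spec_to_list_from_tokens tokens (to_list_from_tokens tokens)

-- ===== LEMMAS AND PROOFS =====

-- A simple structural model of splitting on a single comma.
def pvSplit : List Char → List (List Char)
  | [] => [[]]
  | c :: rest => if c = ',' then [] :: pvSplit rest else (pvSplit rest).modifyHead (c :: ·)

theorem pvSplit_ne_nil (cs : List Char) : pvSplit cs ≠ [] := by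
  cases cs with
  | nil => simp [pvSplit]
  | cons c rest =>
      simp only [pvSplit]
      split_ifs
      · simp
      · cases h : pvSplit rest with
        | nil => exact absurd h (pvSplit_ne_nil rest)
        | cons a l => simp

theorem pvModifyHead_modifyHead {α : Type} (f g : α → α) (l : List α) :
    (l.modifyHead f).modifyHead g = l.modifyHead (g ∘ f) := by
  cases l <;> simp

theorem pvGo_eq : ∀ (fuel : Nat) (l cur : List Char) (accs : List (List Char)),
    l.length ≤ fuel →
    PySem.Chars.splitOn.go [','] fuel l cur accs
      = accs.reverse ++ (pvSplit l).modifyHead (cur.reverse ++ ·)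
  | 0, l, cur, accs, h => by
      have hl : l = [] := List.eq_nil_of_length_eq_zero (Nat.le_zero.mp h)
      subst hl
      simp [PySem.Chars.splitOn.go, pvSplit]
  | (n+1), [], cur, accs, _ => by
      simp [PySem.Chars.splitOn.go, pvSplit]
  | (n+1), (c :: rest), cur, accs, h => by
      have hr : rest.length ≤ n := by simpa using h
      by_cases hc : c = ','
      · subst hc
        have hstep : PySem.Chars.splitOn.go [','] (n+1) (',' :: rest) cur accs
            = PySem.Chars.splitOn.go [','] n rest [] (cur.reverse :: accs) := by
          simp [PySem.Chars.splitOn.go, List.isPrefixOf]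
        rw [hstep, pvGo_eq n rest [] (cur.reverse :: accs) hr]
        simp only [pvSplit]
        cases hps : pvSplit rest <;> simp
      · have hstep : PySem.Chars.splitOn.go [','] (n+1) (c :: rest) cur accs
            = PySem.Chars.splitOn.go [','] n rest (c :: cur) accs := by
          simp [PySem.Chars.splitOn.go, List.isPrefixOf, (Ne.symm hc)]
        rw [hstep, pvGo_eq n rest (c :: cur) accs hr]
        simp only [pvSplit, if_neg hc, pvModifyHead_modifyHead]
        cases hps : pvSplit rest <;> simp

theorem pvSplitOn_eq (cs : List Char) : PySem.Chars.splitOn cs [','] = pvSplit cs := by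
  unfold PySem.Chars.splitOn
  rw [pvGo_eq (cs.length + 1) cs [] [] (by omega)]
  cases hps : pvSplit cs <;> simp

theorem pvInnerFold (l acc : List String) :
    l.foldl (fun out t =>
      let t2 := PySem.Str.strip t
      if t2 ≠ "" then out ++ [t2] else out) acc
    = acc ++ (l.map PySem.Str.strip).filter (fun s => s ≠ "") := by
  induction l generalizing acc with
  | nil => simp
  | cons x xs ih =>
      simp only [List.foldl_cons, List.map_cons, List.filter_cons, ih]
      by_cases hx : PySem.Str.strip x = "" <;> simp [hx]

theorem pvFields_eq (s : String) :
    (PySem.Str.split? s ",").getD [] = (pvSplit s.toList).map String.ofList := by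
  simp [PySem.Str.split?, PySem.Chars.split?, pvSplitOn_eq]

theorem pvA_flatMap (tokens : List String) :
    to_list_from_tokens tokens
      = tokens.flatMap (fun tok =>
          (((pvSplit tok.toList).map (fun t => PySem.Str.strip (String.ofList t))).filter
            (fun s => s ≠ ""))) := by
  unfold to_list_from_tokens
  have : ∀ (acc : List String),
      tokens.foldl (fun out tok =>
        ((PySem.Str.split? tok ",").getD []).foldl (fun out t =>
          let t2 := PySem.Str.strip t
          if t2 ≠ "" then out ++ [t2] else out) out) acc
      = acc ++ tokens.flatMap (fun tok =>
          (((pvSplit tok.toList).map (fun t => PySem.Str.strip (String.ofList t))).filter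
            (fun s => s ≠ ""))) := by
    induction tokens with
    | nil => simp
    | cons x xs ih =>
        intro acc
        rw [List.foldl_cons, pvInnerFold, ih]
        simp [pvFields_eq, List.map_map, Function.comp_def, List.append_assoc]
  simpa using this []

-- pvFlush appends exactly the stripped field when it is non-empty
theorem pvFlush_eq (buf : List Char) (out : List String) :
    pvFlush buf out
      = out ++ (([buf].map (fun t => PySem.Str.strip (String.ofList t))).filter
          (fun s => s ≠ "")) := by
  unfold pvFlush
  have hstrip : PySem.Str.strip (String.ofList buf)
      = String.ofList ((buf.dropWhile PySem.Chars.isspace).reverse.dropWhile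
          PySem.Chars.isspace).reverse := by
    apply String.toList_inj.mp
    simp [PySem.Chars.strip, PySem.Chars.lstrip, PySem.Chars.rstrip]
  have hempty : ∀ l : List Char, (String.ofList l = "") ↔ l = [] := by
    intro l
    constructor
    · intro h
      have := congrArg String.toList h
      simpa using this
    · intro h; subst h; rfl
  simp only [List.map_cons, List.map_nil, List.filter_cons, List.filter_nil, hstrip]
  by_cases h : ((buf.dropWhile PySem.Chars.isspace).reverse.dropWhile
      PySem.Chars.isspace).reverse = []
  · rw [if_neg (by simp [h]), if_neg (by simp [hempty, h])]
    simp
  · rw [if_pos (by simp [h]), if_pos (by simp [hempty, h])]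

-- the character scan over cs, started with buffer buf, emits exactly the stripped
-- non-empty fields of (pvSplit cs).modifyHead (buf ++ ·)
theorem pvScan_eq (cs : List Char) : ∀ (buf : List Char) (out : List String),
    (let st := cs.foldl (fun (s : List Char × List String) ch =>
        if ch = ',' then ([], pvFlush s.1 s.2) else (s.1 ++ [ch], s.2)) (buf, out)
     pvFlush st.1 st.2)
    = out ++ ((((pvSplit cs).modifyHead (buf ++ ·)).map
          (fun t => PySem.Str.strip (String.ofList t))).filter (fun s => s ≠ "")) := by
  induction cs with
  | nil => intro buf out; simp [pvSplit, pvFlush_eq]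
  | cons c rest ih =>
      intro buf out
      by_cases hc : c = ','
      · subst hc
        simp only [List.foldl_cons, reduceIte]
        rw [ih [] (pvFlush buf out), pvFlush_eq]
        simp only [pvSplit, reduceIte]
        cases hps : pvSplit rest with
        | nil => exact absurd hps (pvSplit_ne_nil rest)
        | cons a l => simp [← List.filter_append]
      · simp only [List.foldl_cons, if_neg hc]
        rw [ih (buf ++ [c]) out]
        simp only [pvSplit, if_neg hc, pvModifyHead_modifyHead]
        have : (fun x => buf ++ x) ∘ (fun x => c :: x) = fun x => (buf ++ [c]) ++ x := by
          funext x; simp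
        rw [this]

theorem pvB_flatMap (tokens : List String) :
    to_list_from_tokens_alt tokens
      = tokens.flatMap (fun tok =>
          (((pvSplit tok.toList).map (fun t => PySem.Str.strip (String.ofList t))).filter
            (fun s => s ≠ ""))) := by
  unfold to_list_from_tokens_alt
  have : ∀ (acc : List String),
      tokens.foldl (fun out tok =>
        let st := tok.toList.foldl (fun (s : List Char × List String) ch =>
          if ch = ',' then ([], pvFlush s.1 s.2) else (s.1 ++ [ch], s.2)) ([], out)
        pvFlush st.1 st.2) acc
      = acc ++ tokens.flatMap (fun tok =>
          (((pvSplit tok.toList).map (fun t => PySem.Str.strip (String.ofList t))).filter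
            (fun s => s ≠ ""))) := by
    induction tokens with
    | nil => simp
    | cons x xs ih =>
        intro acc
        rw [List.foldl_cons]
        simp only []
        rw [pvScan_eq x.toList [] acc, ih]
        have hmh : (pvSplit x.toList).modifyHead (([] : List Char) ++ ·) = pvSplit x.toList := by
          cases pvSplit x.toList <;> simp
        rw [hmh]
        simp [List.append_assoc]
  simpa using this []

-- ===== VERDICT (by name: the statement is the Claim_ definition above) =====
theorem to_list_from_tokens_spec : Claim_equal_to_list_from_tokens := by
  intro tokens _
  unfold Spec_to_list_from_tokens
  rw [pvA_flatMap, pvB_flatMap]
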